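-- pv_equiv track=rewrite | github.com/noahbt/advent | 2025/p6.py | calculate_expression_sum2
-- ===== SOURCE A (Python) =====
-- def calculate_expression_sum2(data):
--     # same thing as last time, except the numbers are top down instead of left to right
--     line_length = len(data[0].strip())
--     operators_line = data[-1].strip().split()
--     result_arr = []
--
--     op_i = 0
--     col = 0
--     # read columns until you get all spaces, then perform the operation on the resulting numbers
--     # each column is a number
--     numbers = []
--     while col < line_length:
--         num_str = ''
--         for row in range(len(data) - 1):
--             char = data[row][col]
--             if char != ' ':
--                 num_str += char
--         if num_str == '':
--             # perform operation on numbers and add this to the the result array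
--             result = calculate_result(numbers, operators_line[op_i])
--             result_arr.append(result)
--             op_i += 1
--             numbers = []
--         else:
--             numbers.append(int(num_str))
--         col += 1
--     result = calculate_result(numbers, operators_line[op_i])
--     result_arr.append(result)
--     total_sum = sum(result_arr)
--     assert len(result_arr) == len(operators_line)
--     return total_sum
--
-- def calculate_result(numbers, operator):
--     if operator == '*':
--         prod = 1
--         for n in numbers:
--             prod *= n
--         return prod
--     elif operator == '+':
--         return sum(numbers)
-- ===== SOURCE B (Python) =====
-- def calculate_expression_sum2(data):
--     width = len(data[0].strip())
--     # transpose the number block row by row: zip each line onto per-column buffers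
--     cols = ['' for _ in range(width)]
--     for line in data[:-1]:
--         cols = [buf if ch == ' ' else buf + ch for buf, ch in zip(cols, line)]
--     ops = data[-1].strip().split()
--     assert sum(col == '' for col in cols) + 1 == len(ops)
--     # parse: each operator consumes the columns up to (and including) the next blank one
--     it = iter(cols)
--     total = 0
--     for op in ops:
--         nums = []
--         for col in it:
--             if col == '':
--                 break
--             nums.append(int(col))
--         if op == '+':
--             total += sum(nums)
--         elif op == '*':
--             prod = 1
--             for n in nums:
--                 prod *= n
--             total += prod
--         else:
--             raise ValueError('unknown operator: ' + op)
--     return total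
-- ===== Notes on version B (the rewrite author's own statement) =====
-- stated objective: alternative
-- what changed: A scans column indices with an op_i/numbers/result_arr state machine reading data[row][col]; B instead transposes row by row (zipping each line onto per-column buffers, never indexing columns) and then parses with a shared iterator: each operator consumes columns up to the next blank one, accumulating a running total with no group list, result array or index counter.
import Mathlib
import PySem

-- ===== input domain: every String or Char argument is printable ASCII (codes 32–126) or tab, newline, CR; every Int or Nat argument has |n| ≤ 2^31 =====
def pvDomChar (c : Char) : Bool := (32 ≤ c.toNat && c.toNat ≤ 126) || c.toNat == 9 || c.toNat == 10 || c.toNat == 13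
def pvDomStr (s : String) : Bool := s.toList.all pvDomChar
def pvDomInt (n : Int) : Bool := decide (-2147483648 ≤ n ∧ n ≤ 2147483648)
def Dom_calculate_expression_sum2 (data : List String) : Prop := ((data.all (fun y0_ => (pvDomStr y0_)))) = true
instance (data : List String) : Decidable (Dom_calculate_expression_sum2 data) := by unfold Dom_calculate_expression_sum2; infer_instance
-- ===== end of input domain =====

-- B replaces A's column-index state machine by a row-wise zip transpose followed by an
-- iterator-consumption parse (each operator consumes columns up to the next blank one).

-- data[row][col] (A's indexing expression); default ' ' is never taken under Pre_
def pvCharAt (data : List String) (row col : Int) : Char :=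
  (PySem.Str.pyGet? (PySem.List.pyGetD data row "") col).getD ' '

-- ===== PORT A =====
def calcResultA (numbers : List Int) (operator : String) : Int :=
  if operator = "*" then numbers.foldl (fun prod n => prod * n) 1
  else if operator = "+" then numbers.sum
  else 0  -- Python returns None here; such inputs are outside Pre_

def calculate_expression_sum2 (data : List String) : Int :=
  let line_length : Int := PySem.Str.len (PySem.Str.strip (PySem.List.pyGetD data 0 ""))
  let operators_line : List String := PySem.Str.split₀ (PySem.Str.strip (PySem.List.pyGetD data (-1) ""))
  let st := (PySem.List.pyRange 0 line_length 1).foldl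
    (fun (st : Int × List Int × List Int) col =>
      (fun (num_str : List Char) =>
        if num_str = [] then
          (st.1 + 1, ([] : List Int),
           st.2.2 ++ [calcResultA st.2.1 (PySem.List.pyGetD operators_line st.1 "")])
        else
          (st.1, st.2.1 ++ [(PySem.Int.ofChars? num_str).getD 0], st.2.2))
      ((PySem.List.pyRange 0 (PySem.List.len data - 1) 1).foldl
        (fun acc row =>
          if pvCharAt data row col != ' ' then acc ++ [pvCharAt data row col] else acc)
        ([] : List Char)))
    (0, [], [])
  (st.2.2 ++ [calcResultA st.2.1 (PySem.List.pyGetD operators_line st.1 "")]).sum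

-- ===== PORT B =====
-- cols = [buf if ch == ' ' else buf + ch for buf, ch in zip(cols, line)], folded over data[:-1]
def pvColsB (data : List String) (width : Int) : List (List Char) :=
  data.dropLast.foldl
    (fun cols line =>
      List.zipWith (fun buf ch => if ch = ' ' then buf else buf ++ [ch]) cols line.toList)
    ((PySem.List.pyRange 0 width 1).map (fun _ => ([] : List Char)))

-- the inner 'for col in it: if col == '': break; nums.append(int(col))' on the shared
-- iterator: returns the numbers consumed and the columns remaining in the iterator
def pvConsume : List (List Char) → List Int × List (List Char)
  | [] => ([], [])
  | c :: rest =>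
    if c = [] then ([], rest)
    else
      let p := pvConsume rest
      ((PySem.Int.ofChars? c).getD 0 :: p.1, p.2)

def calculate_expression_sum2_alt (data : List String) : Int :=
  (((PySem.Str.split₀ (PySem.Str.strip (PySem.List.pyGetD data (-1) ""))).foldl
    (fun (st : Int × List (List Char)) op =>
      let p := pvConsume st.2
      (st.1 +
        (if op = "+" then p.1.sum
         else if op = "*" then p.1.foldl (fun prod n => prod * n) 1
         else 0),  -- Python raises ValueError here; such inputs are outside Pre_
       p.2))
    (0, pvColsB data (PySem.Str.len (PySem.Str.strip (PySem.List.pyGetD data 0 ""))))).1)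

-- ===== PRECONDITION & SPEC =====
-- the column strings A reads (used only to state Pre_)
def pvColStrs (data : List String) : List (List Char) :=
  (PySem.List.pyRange 0 (PySem.Str.len (PySem.Str.strip (PySem.List.pyGetD data 0 ""))) 1).map
    (fun col =>
      ((PySem.List.pyRange 0 (PySem.List.len data - 1) 1).filter
        (fun row => pvCharAt data row col != ' ')).map
        (fun row => pvCharAt data row col))

-- Pre_ is exactly where the Python A returns: nonempty data, every number row long
-- enough for every scanned column (else IndexError), every nonblank column parses as
-- int (else ValueError), #groups = #operators (else IndexError/AssertionError), and
-- every operator is '+' or '*' (else calculate_result returns None and sum raises).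
def Pre_calculate_expression_sum2 (data : List String) : Prop :=
  data ≠ [] ∧
  (∀ s ∈ data.dropLast,
      PySem.Str.len (PySem.Str.strip (PySem.List.pyGetD data 0 "")) ≤ PySem.Str.len s) ∧
  (∀ c ∈ pvColStrs data, c ≠ [] → (PySem.Int.ofChars? c).isSome = true) ∧
  ((pvColStrs data).countP (· == []) + 1
      = (PySem.Str.split₀ (PySem.Str.strip (PySem.List.pyGetD data (-1) ""))).length) ∧
  (∀ op ∈ PySem.Str.split₀ (PySem.Str.strip (PySem.List.pyGetD data (-1) "")),
      op = "+" ∨ op = "*")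
instance (data : List String) : Decidable (Pre_calculate_expression_sum2 data) := by
  unfold Pre_calculate_expression_sum2; infer_instance

def pvWitness_calculate_expression_sum2 : List String := ["12 34", "+  *"]

def Spec_calculate_expression_sum2 (data : List String) (out : Int) : Prop :=
  out = calculate_expression_sum2_alt data
instance (data : List String) (out : Int) : Decidable (Spec_calculate_expression_sum2 data out) := by
  unfold Spec_calculate_expression_sum2; infer_instance

-- ===== CLAIM (what is proved, stated in full; the proofs are below) =====
def Claim_equal_calculate_expression_sum2 : Prop :=
  ∀ (data : List String), Dom_calculate_expression_sum2 data →
    Pre_calculate_expression_sum2 data →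
    Spec_calculate_expression_sum2 data (calculate_expression_sum2 data)

-- ===== LEMMAS AND PROOFS =====

-- the group list of a column-string list, head group first
def pvMerge (g : List Int) : List (List Int) → List (List Int)
  | [] => [g]
  | h :: t => (g ++ h) :: t

def pvSplit : List (List Char) → List (List Int)
  | [] => [[]]
  | s :: cs =>
    if s = [] then [] :: pvSplit cs
    else pvMerge [(PySem.Int.ofChars? s).getD 0] (pvSplit cs)

theorem pvSplit_ne_nil (cs : List (List Char)) : pvSplit cs ≠ [] := by
  cases cs with
  | nil => simp [pvSplit]
  | cons s cs =>
    simp only [pvSplit]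
    split
    · simp
    · cases h : pvSplit cs <;> simp [pvMerge]

theorem pvMerge_nil (gs : List (List Int)) (h : gs ≠ []) : pvMerge [] gs = gs := by
  cases gs with
  | nil => exact absurd rfl h
  | cons g t => simp [pvMerge]

theorem pvMerge_merge (g : List Int) (x : Int) (gs : List (List Int)) (h : gs ≠ []) :
    pvMerge g (pvMerge [x] gs) = pvMerge (g ++ [x]) gs := by
  cases gs with
  | nil => exact absurd rfl h
  | cons h t => simp [pvMerge]

theorem pvSplit_length (cs : List (List Char)) :
    (pvSplit cs).length = cs.countP (· == []) + 1 := by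
  induction cs with
  | nil => simp [pvSplit]
  | cons s cs ih =>
    simp only [pvSplit, List.countP_cons]
    split
    · next hs => simp [hs, List.length_cons, ih]
    · next hs =>
      cases h : pvSplit cs with
      | nil => exact absurd h (pvSplit_ne_nil cs)
      | cons g t =>
        simp only [pvMerge]
        have := ih
        rw [h] at this
        simp only [List.length_cons] at this ⊢
        simp [hs, this]

-- the per-group results of A, using pyGetD indexing from position k
def pvRes (ops : List String) (k : Int) : List (List Int) → List Int
  | [] => []
  | g :: gs => calcResultA g (PySem.List.pyGetD ops k "") :: pvRes ops (k + 1) gs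

def pvFlush (ops : List String) (st : Int × List Int × List Int) : List Int :=
  st.2.2 ++ [calcResultA st.2.1 (PySem.List.pyGetD ops st.1 "")]

-- A's state-machine fold, flushed with the final calculate_result, computes pvRes
theorem A_loop (ops : List String) (cs : List (List Char)) (k : Int)
    (cur : List Int) (arr : List Int) :
    pvFlush ops
      (cs.foldl
        (fun (st : Int × List Int × List Int) (num_str : List Char) =>
          if num_str = [] then
            (st.1 + 1, ([] : List Int),
             st.2.2 ++ [calcResultA st.2.1 (PySem.List.pyGetD ops st.1 "")])
          else
            (st.1, st.2.1 ++ [(PySem.Int.ofChars? num_str).getD 0], st.2.2))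
        (k, cur, arr))
    = arr ++ pvRes ops k (pvMerge cur (pvSplit cs)) := by
  induction cs generalizing k cur arr with
  | nil => simp [pvSplit, pvMerge, pvRes, pvFlush]
  | cons s cs ih =>
    simp only [List.foldl_cons]
    by_cases hs : s = []
    · subst hs
      rw [if_pos rfl, ih (k + 1) [] (arr ++ [calcResultA cur (PySem.List.pyGetD ops k "")])]
      rw [pvMerge_nil _ (pvSplit_ne_nil cs)]
      simp [pvSplit, pvMerge, pvRes]
    · rw [if_neg hs]
      rw [ih k (cur ++ [(PySem.Int.ofChars? s).getD 0]) arr]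
      simp only [pvSplit, if_neg hs]
      rw [pvMerge_merge _ _ _ (pvSplit_ne_nil cs)]

def calcResultB (numbers : List Int) (operator : String) : Int :=
  if operator = "+" then numbers.sum
  else if operator = "*" then numbers.foldl (fun prod n => prod * n) 1
  else 0

theorem calcResultA_eq_calcResultB (n : List Int) (op : String) :
    calcResultA n op = calcResultB n op := by
  unfold calcResultA calcResultB
  by_cases h1 : op = "*" <;> by_cases h2 : op = "+" <;> simp [h1, h2]

-- A's inline per-column character fold equals the filter/map column string
theorem colStr_eq (data : List String) (col : Int) :
    (PySem.List.pyRange 0 (PySem.List.len data - 1) 1).foldl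
      (fun acc row =>
        if pvCharAt data row col != ' ' then acc ++ [pvCharAt data row col] else acc)
      ([] : List Char)
    = ((PySem.List.pyRange 0 (PySem.List.len data - 1) 1).filter
        (fun row => pvCharAt data row col != ' ')).map (fun row => pvCharAt data row col) := by
  rw [PySem.List.foldl_append_if]
  simp

-- A's fused column loop, after rewriting each inline column string to the
-- filter/map form, is a fold over pvColStrs
theorem portA_eq (data : List String) :
    calculate_expression_sum2 data
      = (pvRes (PySem.Str.split₀ (PySem.Str.strip (PySem.List.pyGetD data (-1) ""))) 0
          (pvMerge [] (pvSplit (pvColStrs data)))).sum := by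
  have hbridge :
      (PySem.List.pyRange 0 (PySem.Str.len (PySem.Str.strip (PySem.List.pyGetD data 0 ""))) 1).foldl
        (fun (st : Int × List Int × List Int) col =>
          if ((PySem.List.pyRange 0 (PySem.List.len data - 1) 1).foldl
                (fun acc row =>
                  if pvCharAt data row col != ' ' then acc ++ [pvCharAt data row col] else acc)
                ([] : List Char)) = [] then
            (st.1 + 1, ([] : List Int),
             st.2.2 ++ [calcResultA st.2.1
               (PySem.List.pyGetD
                 (PySem.Str.split₀ (PySem.Str.strip (PySem.List.pyGetD data (-1) ""))) st.1 "")])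
          else
            (st.1, st.2.1 ++ [(PySem.Int.ofChars?
                ((PySem.List.pyRange 0 (PySem.List.len data - 1) 1).foldl
                  (fun acc row =>
                    if pvCharAt data row col != ' ' then acc ++ [pvCharAt data row col] else acc)
                  ([] : List Char))).getD 0], st.2.2))
        (0, [], [])
      = (pvColStrs data).foldl
          (fun (st : Int × List Int × List Int) (num_str : List Char) =>
            if num_str = [] then
              (st.1 + 1, ([] : List Int),
               st.2.2 ++ [calcResultA st.2.1
                 (PySem.List.pyGetD
                   (PySem.Str.split₀ (PySem.Str.strip (PySem.List.pyGetD data (-1) ""))) st.1 "")])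
            else
              (st.1, st.2.1 ++ [(PySem.Int.ofChars? num_str).getD 0], st.2.2))
          (0, [], []) := by
    simp only [colStr_eq]
    exact (List.foldl_map
      (f := fun col =>
        ((PySem.List.pyRange 0 (PySem.List.len data - 1) 1).filter
          (fun row => pvCharAt data row col != ' ')).map (fun row => pvCharAt data row col))
      (g := fun (st : Int × List Int × List Int) (num_str : List Char) =>
        if num_str = [] then
          (st.1 + 1, ([] : List Int),
           st.2.2 ++ [calcResultA st.2.1
             (PySem.List.pyGetD
               (PySem.Str.split₀ (PySem.Str.strip (PySem.List.pyGetD data (-1) ""))) st.1 "")])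
        else
          (st.1, st.2.1 ++ [(PySem.Int.ofChars? num_str).getD 0], st.2.2))).symm
  have hA := A_loop (PySem.Str.split₀ (PySem.Str.strip (PySem.List.pyGetD data (-1) "")))
    (pvColStrs data) 0 [] []
  simp only [List.nil_append] at hA
  unfold pvFlush at hA
  simp only [calculate_expression_sum2]
  rw [hbridge, hA]

-- pvRes with aligned lengths is a zip/map
theorem pvRes_eq_zip (ops : List String) (gs : List (List Int)) (k : Nat)
    (h : k + gs.length = ops.length) :
    pvRes ops (k : Int) gs
      = ((gs.zip (ops.drop k)).map (fun p => calcResultB p.1 p.2)) := by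
  induction gs generalizing k with
  | nil => simp [pvRes]
  | cons g gs ih =>
    have hk : k < ops.length := by simp at h; omega
    have hdrop : ops.drop k = ops[k] :: ops.drop (k + 1) := List.drop_eq_getElem_cons hk
    rw [hdrop]
    simp only [pvRes, List.zip_cons_cons, List.map_cons]
    rw [PySem.List.pyGetD_natCast, List.getD_eq_getElem?_getD, List.getElem?_eq_getElem hk]
    simp only [Option.getD_some]
    rw [calcResultA_eq_calcResultB]
    congr 1
    have hcast : ((k : Int) + 1) = ((k + 1 : Nat) : Int) := by push_cast; ring
    rw [hcast, ih (k + 1) (by simp at h ⊢; omega)]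

-- ----- B-side lemmas -----

-- pvConsume returns the first group of pvSplit …
theorem consume_fst (cols : List (List Char)) :
    (pvConsume cols).1 :: (pvSplit cols).tail = pvSplit cols := by
  induction cols with
  | nil => simp [pvConsume, pvSplit]
  | cons c rest ih =>
    by_cases hc : c = []
    · simp [pvConsume, pvSplit, hc]
    · simp only [pvConsume, pvSplit, if_neg hc]
      cases h : pvSplit rest with
      | nil => exact absurd h (pvSplit_ne_nil rest)
      | cons g gs =>
        rw [h] at ih
        simp only [List.tail_cons] at ih
        have hg : (pvConsume rest).1 = g := by
          injection ih
        simp [pvMerge, hg]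

-- … and its leftover columns split into the remaining groups
theorem consume_snd (cols : List (List Char)) (h : (pvSplit cols).tail ≠ []) :
    pvSplit (pvConsume cols).2 = (pvSplit cols).tail := by
  induction cols with
  | nil => simp [pvSplit] at h
  | cons c rest ih =>
    by_cases hc : c = []
    · simp [pvConsume, pvSplit, hc]
    · simp only [pvConsume, pvSplit, if_neg hc] at h ⊢
      cases hsp : pvSplit rest with
      | nil => exact absurd hsp (pvSplit_ne_nil rest)
      | cons g gs =>
        rw [hsp] at h
        simp only [pvMerge, List.tail_cons] at h ⊢
        have := ih
        rw [hsp] at this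
        simp only [List.tail_cons] at this
        exact this h

-- B's operator fold with the shared iterator computes the zip/map sum
theorem B_ops_loop (ops : List String) (cols : List (List Char)) (t : Int)
    (h : (pvSplit cols).length = ops.length) :
    (ops.foldl
      (fun (st : Int × List (List Char)) op =>
        let p := pvConsume st.2
        (st.1 +
          (if op = "+" then p.1.sum
           else if op = "*" then p.1.foldl (fun prod n => prod * n) 1
           else 0),
         p.2))
      (t, cols)).1
    = t + (((pvSplit cols).zip ops).map (fun p => calcResultB p.1 p.2)).sum := by
  induction ops generalizing cols t with
  | nil => simp
  | cons op ops ih =>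
    have hfst := consume_fst cols
    cases hsp : pvSplit cols with
    | nil => exact absurd hsp (pvSplit_ne_nil cols)
    | cons g gs =>
      rw [hsp] at hfst h
      simp only [List.tail_cons] at hfst
      have hg : (pvConsume cols).1 = g := by injection hfst
      simp only [List.foldl_cons, List.zip_cons_cons, List.map_cons, List.sum_cons]
      cases gs with
      | nil =>
        have hops : ops = [] := by simp at h; omega
        subst hops
        simp [hg, calcResultB]
      | cons g2 gs2 =>
        have hrest : pvSplit (pvConsume cols).2 = g2 :: gs2 := by
          have := consume_snd cols (by rw [hsp]; simp)
          rw [hsp] at this; simpa using this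
        rw [ih (pvConsume cols).2 _ (by rw [hrest]; simpa using h)]
        rw [hrest, hg]
        simp only [calcResultB]
        ring

-- the column a grid position c holds, as both programs see it
def pvColOf (data : List String) (c : Nat) : List Char :=
  (data.dropLast.filter (fun line => line.toList.getD c ' ' != ' ')).map
    (fun line => line.toList.getD c ' ')

-- the row-index range A scans is exactly data[:-1]
theorem rowsMap (data : List String) :
    (PySem.List.pyRange 0 (PySem.List.len data - 1) 1).map
      (fun row => PySem.List.pyGetD data row "") = data.dropLast := by
  cases data with
  | nil =>
    rw [PySem.List.pyRange_one_eq_nil (by simp)]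
    rfl
  | cons a l =>
    have h1 : PySem.List.len (a :: l) - 1 = PySem.List.len ((a :: l).dropLast) := by
      simp
    rw [h1]
    conv_rhs => rw [← PySem.List.map_pyGetD_pyRange_zero ((a :: l).dropLast) ""]
    apply List.map_congr_left
    intro row hrow
    rw [PySem.List.mem_pyRange_one] at hrow
    obtain ⟨h0, hlt⟩ := hrow
    have hlt' : row.toNat < (a :: l).dropLast.length := by
      simp at hlt ⊢; omega
    rw [PySem.List.pyGetD_of_nonneg _ _ h0, PySem.List.pyGetD_of_nonneg _ _ h0,
        List.getD_eq_getElem _ _ hlt', List.getD_eq_getElem _ _ (by simp at hlt' ⊢; omega),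
        List.getElem_dropLast]

-- A's column string at position c is pvColOf
theorem colStrs_getD (data : List String) (c : Nat)
    (hc : c < (PySem.Str.len (PySem.Str.strip (PySem.List.pyGetD data 0 ""))).toNat) :
    (pvColStrs data).getD c [] = pvColOf data c := by
  have hlen : (PySem.List.pyRange 0 (PySem.Str.len (PySem.Str.strip (PySem.List.pyGetD data 0 ""))) 1).length
      = (PySem.Str.len (PySem.Str.strip (PySem.List.pyGetD data 0 ""))).toNat := by
    rw [PySem.List.length_pyRange_one]; omega
  have hc' : c < (pvColStrs data).length := by
    simp only [pvColStrs, List.length_map]; omega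
  rw [List.getD_eq_getElem _ _ hc']
  simp only [pvColStrs, List.getElem_map, PySem.List.getElem_pyRange_one, Int.zero_add]
  unfold pvColOf
  rw [← rowsMap data, List.filter_map, List.map_map]
  have hf : (fun row => pvCharAt data row (c : Int))
      = ((fun line => line.toList.getD c ' ') ∘ (fun row => PySem.List.pyGetD data row "")) :=
    funext fun row => by simp [pvCharAt, Function.comp]
  have hp : (fun row => pvCharAt data row (c : Int) != ' ')
      = ((fun line => line.toList.getD c ' ' != ' ') ∘ (fun row => PySem.List.pyGetD data row "")) :=
    funext fun row => by simp [pvCharAt, Function.comp]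
  rw [hf, hp]

-- B's transpose step keeps the buffer-list length (rows are long enough under Pre_)
theorem fold_zip_len (R : List String) (cols : List (List Char))
    (hrows : ∀ line ∈ R, cols.length ≤ line.toList.length) :
    (R.foldl (fun cols line =>
        List.zipWith (fun buf ch => if ch = ' ' then buf else buf ++ [ch]) cols line.toList)
      cols).length = cols.length := by
  induction R generalizing cols with
  | nil => rfl
  | cons line R ih =>
    simp only [List.foldl_cons]
    have hl : (List.zipWith (fun buf ch => if ch = ' ' then buf else buf ++ [ch])
        cols line.toList).length = cols.length := by
      rw [List.length_zipWith]
      exact Nat.min_eq_left (hrows line (by simp))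
    rw [ih _ (by intro l hl'; rw [hl]; exact hrows l (by simp [hl'])), hl]

-- B's row-wise zip fold, read at one position, is a per-column character fold
theorem fold_zip_getD (R : List String) (cols : List (List Char)) (c : Nat)
    (hc : c < cols.length)
    (hrows : ∀ line ∈ R, cols.length ≤ line.toList.length) :
    (R.foldl (fun cols line =>
        List.zipWith (fun buf ch => if ch = ' ' then buf else buf ++ [ch]) cols line.toList)
      cols).getD c []
    = R.foldl
        (fun buf line =>
          if line.toList.getD c ' ' = ' ' then buf else buf ++ [line.toList.getD c ' '])
        (cols.getD c []) := by
  induction R generalizing cols with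
  | nil => rfl
  | cons line R ih =>
    simp only [List.foldl_cons]
    have h0 : cols.length ≤ line.toList.length := hrows line (by simp)
    have hl : (List.zipWith (fun buf ch => if ch = ' ' then buf else buf ++ [ch])
        cols line.toList).length = cols.length := by
      rw [List.length_zipWith]; omega
    rw [ih _ (by omega) (by intro l hl'; rw [hl]; exact hrows l (by simp [hl']))]
    congr 1
    rw [List.getD_eq_getElem _ _ (by omega), List.getElem_zipWith,
        List.getD_eq_getElem _ _ hc, List.getD_eq_getElem _ _ (by omega)]

-- B's transpose at position c is pvColOf
theorem colsB_getD (data : List String) (c : Nat)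
    (hc : c < (PySem.Str.len (PySem.Str.strip (PySem.List.pyGetD data 0 ""))).toNat)
    (hrows : ∀ s ∈ data.dropLast,
        PySem.Str.len (PySem.Str.strip (PySem.List.pyGetD data 0 "")) ≤ PySem.Str.len s) :
    (pvColsB data (PySem.Str.len (PySem.Str.strip (PySem.List.pyGetD data 0 "")))).getD c []
      = pvColOf data c := by
  have hinit : ((PySem.List.pyRange 0 (PySem.Str.len (PySem.Str.strip (PySem.List.pyGetD data 0 ""))) 1).map
      (fun _ => ([] : List Char))).length
      = (PySem.Str.len (PySem.Str.strip (PySem.List.pyGetD data 0 ""))).toNat := by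
    rw [List.length_map, PySem.List.length_pyRange_one]; omega
  have hrows' : ∀ line ∈ data.dropLast,
      ((PySem.List.pyRange 0 (PySem.Str.len (PySem.Str.strip (PySem.List.pyGetD data 0 ""))) 1).map
        (fun _ => ([] : List Char))).length ≤ line.toList.length := by
    intro line hline
    rw [hinit]
    have := hrows line hline
    rw [PySem.Str.len_eq line] at this
    omega
  unfold pvColsB
  rw [fold_zip_getD _ _ c (by omega) hrows']
  have hinitD : ((PySem.List.pyRange 0 (PySem.Str.len (PySem.Str.strip (PySem.List.pyGetD data 0 ""))) 1).map
      (fun _ => ([] : List Char))).getD c [] = ([] : List Char) := by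
    rw [List.getD_eq_getElem _ _ (by omega), List.getElem_map]
  rw [hinitD]
  rw [show (fun (buf : List Char) (line : String) =>
        if line.toList.getD c ' ' = ' ' then buf else buf ++ [line.toList.getD c ' '])
      = (fun (buf : List Char) (line : String) =>
        if (line.toList.getD c ' ' != ' ') = true then buf ++ [line.toList.getD c ' '] else buf)
    from funext fun buf => funext fun line => by simp]
  rw [PySem.List.foldl_append_if]
  simp [pvColOf]

-- B's transpose equals A's column strings
theorem colsB_eq_colStrs (data : List String)
    (hrows : ∀ s ∈ data.dropLast,
        PySem.Str.len (PySem.Str.strip (PySem.List.pyGetD data 0 "")) ≤ PySem.Str.len s) :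
    pvColsB data (PySem.Str.len (PySem.Str.strip (PySem.List.pyGetD data 0 ""))) = pvColStrs data := by
  have hrows' : ∀ line ∈ data.dropLast,
      ((PySem.List.pyRange 0 (PySem.Str.len (PySem.Str.strip (PySem.List.pyGetD data 0 ""))) 1).map
        (fun _ => ([] : List Char))).length ≤ line.toList.length := by
    intro line hline
    rw [List.length_map, PySem.List.length_pyRange_one]
    have := hrows line hline
    rw [PySem.Str.len_eq line] at this
    omega
  have hlenB : (pvColsB data (PySem.Str.len (PySem.Str.strip (PySem.List.pyGetD data 0 "")))).length
      = (PySem.Str.len (PySem.Str.strip (PySem.List.pyGetD data 0 ""))).toNat := by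
    unfold pvColsB
    rw [fold_zip_len _ _ hrows', List.length_map, PySem.List.length_pyRange_one]
    omega
  have hlenA : (pvColStrs data).length
      = (PySem.Str.len (PySem.Str.strip (PySem.List.pyGetD data 0 ""))).toNat := by
    simp only [pvColStrs, List.length_map, PySem.List.length_pyRange_one]
    omega
  apply List.ext_getElem (by omega)
  intro i h1 h2
  rw [← List.getD_eq_getElem _ ([] : List Char) h1, ← List.getD_eq_getElem _ ([] : List Char) h2,
      colsB_getD data i (by omega) hrows, colStrs_getD data i (by omega)]

-- ===== VERDICT (by name: the statement is the Claim_ definition above) =====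
theorem calculate_expression_sum2_spec : Claim_equal_calculate_expression_sum2 := by
  intro data _hdom hpre
  obtain ⟨-, hrows, -, hlen, -⟩ := hpre
  unfold Spec_calculate_expression_sum2
  rw [portA_eq data, pvMerge_nil _ (pvSplit_ne_nil _)]
  have hres := pvRes_eq_zip
    (PySem.Str.split₀ (PySem.Str.strip (PySem.List.pyGetD data (-1) "")))
    (pvSplit (pvColStrs data)) 0
    (by rw [pvSplit_length]; omega)
  simp only [Nat.cast_zero, List.drop_zero] at hres
  rw [hres]
  show _ = calculate_expression_sum2_alt data
  unfold calculate_expression_sum2_alt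
  rw [colsB_eq_colStrs data hrows]
  rw [B_ops_loop _ _ _ (by rw [pvSplit_length]; omega)]
  simp
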